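-- pv_equiv track=rewrite | github.com/Radzihowski/GoIT | module-5/code-snippet3.py | counting_numbers
-- ===== SOURCE A (Python) =====
-- def counting_numbers(string):
--     count = 0
--     position = 0
--     nums = []
--     while position < len(string):
--         if string[position].isdigit():
--             num = ''
--             while position < len(string) and string[position].isdigit():
--                 num += string[position]
--                 position += 1
--             nums.append(num)
--             count += 1
--         else:
--             position += 1
--     return count, nums
-- ===== SOURCE B (Python) =====
-- def counting_numbers(string):
--     nums = ''.join(c if c.isdigit() else ' ' for c in string).split()
--     return len(nums), nums
-- ===== Notes on version B (the rewrite author's own statement) =====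
-- stated objective: faster
-- what changed: Replaces the hand-written index scan with nested while loops building each number char by char by a translate-then-split pipeline: map every non-digit character to a space, then str.split() yields exactly the maximal digit runs; count = len(nums).
import Mathlib
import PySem

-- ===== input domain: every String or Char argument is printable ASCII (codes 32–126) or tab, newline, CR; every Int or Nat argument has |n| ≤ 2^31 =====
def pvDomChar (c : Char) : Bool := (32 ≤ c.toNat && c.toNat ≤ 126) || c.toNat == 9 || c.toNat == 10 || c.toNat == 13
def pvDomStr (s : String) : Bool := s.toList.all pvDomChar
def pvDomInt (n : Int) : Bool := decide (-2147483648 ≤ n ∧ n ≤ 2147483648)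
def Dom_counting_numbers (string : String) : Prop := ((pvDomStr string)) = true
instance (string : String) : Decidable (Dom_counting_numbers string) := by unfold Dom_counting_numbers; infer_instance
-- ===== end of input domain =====

-- B replaces A's hand-written index scan (nested while loops building each number
-- character by character) with a translate-then-split pipeline: map every non-digit
-- character to a space, then str.split() extracts the digit runs; same return value.

-- ===== PORT A =====
-- inner while: consume the digit prefix, return (num collected so far, rest)
def cnTakeDigits : List Char → List Char × List Char
  | [] => ([], [])
  | c :: cs =>
    if PySem.Chars.isdigit c then
      let (s, r) := cnTakeDigits cs
      (c :: s, r)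
    else ([], c :: cs)

theorem cnTakeDigits_len (cs : List Char) : (cnTakeDigits cs).2.length ≤ cs.length := by
  induction cs with
  | nil => simp [cnTakeDigits]
  | cons c cs ih =>
    simp only [cnTakeDigits]
    split
    · simpa using Nat.le_succ_of_le ih
    · simp

-- outer while over the remaining characters (position sweep)
def cnLoopA : List Char → Int × List String
  | [] => (0, [])
  | c :: cs =>
    if PySem.Chars.isdigit c then
      let sr := cnTakeDigits cs
      let cn := cnLoopA sr.2
      (cn.1 + 1, String.ofList (c :: sr.1) :: cn.2)
    else cnLoopA cs
termination_by cs => cs.length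
decreasing_by
  · exact Nat.lt_succ_of_le (cnTakeDigits_len cs)
  · simp

def counting_numbers (string : String) : Int × List String := cnLoopA string.toList

-- ===== PORT B =====
-- ''.join(c if c.isdigit() else ' ' for c in string).split()
def counting_numbers_alt (string : String) : Int × List String :=
  let translated := String.ofList
    (string.toList.map (fun c => if PySem.Chars.isdigit c then c else ' '))
  let nums := PySem.Str.split₀ translated
  ((nums.length : Int), nums)

-- ===== PRECONDITION & SPEC =====
def Spec_counting_numbers (string : String) (out : Int × List String) : Prop := out = counting_numbers_alt string
instance (string : String) (out : Int × List String) : Decidable (Spec_counting_numbers string out) := by unfold Spec_counting_numbers; infer_instance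

-- ===== CLAIM (what is proved, stated in full; the proofs are below) =====
def Claim_equal_counting_numbers : Prop := ∀ (string : String), Dom_counting_numbers string → Spec_counting_numbers string (counting_numbers string)

-- ===== LEMMAS AND PROOFS =====

-- the non-digit → space translation applied by B
def cnTr (c : Char) : Char := if PySem.Chars.isdigit c then c else ' '

-- the maximal digit runs of a character list (the common value both ports compute)
def cnRuns : List Char → List (List Char)
  | [] => []
  | c :: cs =>
    if PySem.Chars.isdigit c then
      (c :: (cnTakeDigits cs).1) :: cnRuns (cnTakeDigits cs).2
    else cnRuns cs
termination_by cs => cs.length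
decreasing_by
  · exact Nat.lt_succ_of_le (cnTakeDigits_len cs)
  · simp

theorem cn_digit_not_space (c : Char) (h : PySem.Chars.isdigit c = true) :
    PySem.Chars.isspace c = false := by
  simp only [PySem.Chars.isdigit, Bool.and_eq_true, decide_eq_true_eq] at h
  have h0 : ('0' : Char).val ≤ c.val := h.1
  have h9 : c.val ≤ ('9' : Char).val := h.2
  have h0' : (48 : Nat) ≤ c.toNat := UInt32.le_iff_toNat_le.mp h0
  have h9' : c.toNat ≤ 57 := UInt32.le_iff_toNat_le.mp h9
  simp [PySem.Chars.isspace]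
  omega

theorem cn_space_isspace : PySem.Chars.isspace ' ' = true := by decide

-- A's loop computes the digit runs
theorem cnLoopA_eq_runs (cs : List Char) :
    cnLoopA cs = (((cnRuns cs).length : Int), (cnRuns cs).map String.ofList) := by
  induction cs using cnLoopA.induct with
  | case1 => simp [cnLoopA, cnRuns]
  | case2 c cs hc sr ih =>
    have ih' : cnLoopA (cnTakeDigits cs).2 =
        (((cnRuns (cnTakeDigits cs).2).length : Int),
          (cnRuns (cnTakeDigits cs).2).map String.ofList) := ih
    rw [cnLoopA, cnRuns]
    simp only [hc, if_pos, ih']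
    simp
  | case3 c cs hc ih =>
    have hc' : PySem.Chars.isdigit c = false := by simpa using hc
    rw [cnLoopA, cnRuns]
    simp [hc', ih]

-- the remainder after cnTakeDigits is empty or starts with a non-digit
theorem cnTakeDigits_rest (cs : List Char) :
    (cnTakeDigits cs).2 = [] ∨
      ∃ h t, (cnTakeDigits cs).2 = h :: t ∧ PySem.Chars.isdigit h = false := by
  induction cs with
  | nil => left; rfl
  | cons c cs ih =>
    by_cases hc : PySem.Chars.isdigit c = true
    · simpa [cnTakeDigits, hc] using ih
    · right
      exact ⟨c, cs, by simp [cnTakeDigits, hc], by simpa using hc⟩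

-- consuming a digit prefix only grows go's current word
theorem cn_go_digits (cs cur acc) :
    PySem.Chars.split₀.go (cs.map cnTr) cur acc =
      PySem.Chars.split₀.go ((cnTakeDigits cs).2.map cnTr)
        ((cnTakeDigits cs).1.reverse ++ cur) acc := by
  induction cs generalizing cur with
  | nil => simp [cnTakeDigits]
  | cons c cs ih =>
    by_cases hc : PySem.Chars.isdigit c = true
    · have hsp : PySem.Chars.isspace c = false := cn_digit_not_space c hc
      simp only [List.map, cnTr, hc, if_pos, PySem.Chars.split₀.go, hsp,
        Bool.false_eq_true, if_false, cnTakeDigits]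
      rw [ih (c :: cur)]
      rcases h : cnTakeDigits cs with ⟨p, r⟩
      simp
    · simp [cnTakeDigits, hc]

-- go with an empty current word computes the digit runs
theorem cn_go_runs (n : Nat) (cs : List Char) (acc : List (List Char))
    (hn : cs.length ≤ n) :
    PySem.Chars.split₀.go (cs.map cnTr) [] acc = acc.reverse ++ cnRuns cs := by
  induction n generalizing cs acc with
  | zero =>
    have hcs : cs = [] := by cases cs <;> simp_all
    subst hcs
    simp [PySem.Chars.split₀.go, cnRuns]
  | succ n ih =>
    match cs with
    | [] => simp [PySem.Chars.split₀.go, cnRuns]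
    | c :: cs =>
      by_cases hc : PySem.Chars.isdigit c = true
      · have hsp : PySem.Chars.isspace c = false := cn_digit_not_space c hc
        simp only [List.map, cnTr, hc, if_pos, PySem.Chars.split₀.go, hsp,
          Bool.false_eq_true, if_false]
        rw [cn_go_digits cs [c] acc]
        have hlen := cnTakeDigits_len cs
        rcases cnTakeDigits_rest cs with hr | ⟨h, t, hr, hnd⟩
        · rw [hr]
          simp [PySem.Chars.split₀.go, cnRuns, hc, hr]
        · rw [hr]
          have hsp2 : PySem.Chars.isspace (cnTr h) = true := by
            simp [cnTr, hnd, cn_space_isspace]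
          simp only [List.map, PySem.Chars.split₀.go, hsp2, if_pos]
          rw [if_neg (by simp : ¬ (((cnTakeDigits cs).1.reverse ++ [c]).isEmpty = true))]
          have ht : t.length ≤ n := by
            rw [hr] at hlen
            simp only [List.length_cons] at hlen hn
            omega
          rw [ih t _ ht, cnRuns]
          simp only [hc, if_pos, hr, cnRuns, hnd, Bool.false_eq_true, if_false]
          simp
      · have hc' : PySem.Chars.isdigit c = false := by simpa using hc
        have hsp : PySem.Chars.isspace (cnTr c) = true := by
          simp [cnTr, hc', cn_space_isspace]
        simp only [List.map, PySem.Chars.split₀.go, hsp, if_pos, List.isEmpty_nil]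
        rw [ih cs acc (by simp only [List.length_cons] at hn; omega), cnRuns]
        simp [hc']

-- ===== VERDICT (by name: the statement is the Claim_ definition above) =====
theorem counting_numbers_spec : Claim_equal_counting_numbers := by
  intro s hd
  unfold Spec_counting_numbers counting_numbers counting_numbers_alt
  rw [cnLoopA_eq_runs]
  have hmap : s.toList.map (fun c => if PySem.Chars.isdigit c then c else ' ')
      = s.toList.map cnTr := rfl
  simp only [PySem.Str.split₀, PySem.Chars.split₀, hmap]
  rw [show (String.ofList (s.toList.map cnTr)).toList = s.toList.map cnTr from by simp,
    cn_go_runs s.toList.length s.toList [] (Nat.le_refl _)]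
  simp
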